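-- pv_equiv track=rewrite | github.com/0xStryK3R/Scaler-DSA-Revision | python/Day-22/CW_3.py | solve
-- ===== SOURCE A (Python) =====
-- def solve(A, B, C):
--     d = C - B
--
--     div_list = []
--
--     i = 1
--
--     while i * i <= d:
--         if d % i == 0:
--             if i < A:
--                 div_list.append(d // i)
--             if d // i < A and i != d // i:
--                 div_list.append(i)
--         i += 1
--
--     div_list.sort(reverse=True)
--
--     for div in div_list:
--         if C // div >= A:
--             break
--
--     ans = [C]
--
--     for i in range(A - 1):
--         if ans[0] - div > 0:
--             ans = [ans[0] - div] + ans
--         else: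
--             ans.append(ans[-1] + div)
--
--     return ans
-- ===== SOURCE B (Python) =====
-- def solve(A, B, C):
--     if A <= 1:
--         return [C]
--     d = C - B
--     # collect exactly the divisors e of d whose cofactor d // e is < A (a set: no duplicates)
--     divs = set()
--     i = 1
--     while i * i <= d:
--         if d % i == 0:
--             for e in (i, d // i):
--                 if d // e < A:
--                     divs.add(e)
--         i += 1
--     # chosen step: largest divisor allowing A terms up to C, else the smallest collected divisor
--     cands = [e for e in divs if C // e >= A]
--     div = max(cands) if cands else min(divs)
--     # closed-form construction: p terms before C, the rest after
--     p = min(A - 1, max(0, (C - 1) // div))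
--     return [C - j * div for j in range(p, 0, -1)] + [C] + [C + k * div for k in range(1, A - p)]
-- ===== Notes on version B (the rewrite author's own statement) =====
-- stated objective: faster
-- what changed: The sort-then-scan-with-for/else divisor selection is replaced by max over the feasible candidates / min of the collected divisor set, and the prepend-or-append build loop (each prepend copies the whole list) is replaced by a division-computed prepend count with direct closed-form list construction.
import Mathlib
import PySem

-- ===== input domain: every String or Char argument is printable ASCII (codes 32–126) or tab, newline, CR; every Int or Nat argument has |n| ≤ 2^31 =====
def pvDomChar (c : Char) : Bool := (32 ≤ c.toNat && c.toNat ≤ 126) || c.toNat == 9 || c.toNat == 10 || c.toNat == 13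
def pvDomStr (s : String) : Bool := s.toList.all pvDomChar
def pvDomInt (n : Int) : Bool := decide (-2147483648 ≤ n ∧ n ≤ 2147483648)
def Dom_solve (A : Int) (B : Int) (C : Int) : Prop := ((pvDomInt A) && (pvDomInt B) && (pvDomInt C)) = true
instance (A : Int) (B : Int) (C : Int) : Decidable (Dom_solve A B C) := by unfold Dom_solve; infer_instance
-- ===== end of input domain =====

set_option maxRecDepth 4000
set_option maxHeartbeats 1000000


-- B replaces A's sort-then-scan divisor selection by max/min over a set and the quadratic
-- prepend/append build loop by a division-computed closed-form construction (objective: faster).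

-- ===== PORT A =====
-- while i*i <= d: collect d//i (if i < A) and i (if d//i < A and i != d//i)
def pvCollectA (A : Int) (d : Int) (i : Int) (acc : List Int) : List Int :=
  if PySem.Int.mod d i = 0 then
    let acc' := if i < A then acc ++ [PySem.Int.floordiv d i] else acc
    if PySem.Int.floordiv d i < A ∧ i ≠ PySem.Int.floordiv d i then acc' ++ [i] else acc'
  else acc

-- fuel = (d + 1 - i).toNat bounds the number of iterations of 'while i * i <= d' (exact: when
-- fuel reaches 0 the guard i * i ≤ d is already false), so this structural recursion is the loop
def pvDivLoopA (A : Int) (d : Int) : Nat → Int → List Int → List Int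
  | 0, _, acc => acc
  | fuel + 1, i, acc =>
    if i * i ≤ d then pvDivLoopA A d fuel (i + 1) (pvCollectA A d i acc) else acc

-- the for/break loop: final value of div (none iff the list is empty → NameError in Python)
def pvPickA (A : Int) (C : Int) : List Int → Option Int
  | [] => none
  | e :: t =>
    if A ≤ PySem.Int.floordiv C e then some e
    else match t with
      | [] => some e
      | _ :: _ => pvPickA A C t

-- one iteration of A's build loop
def pvStepA (div : Int) (ans : List Int) (_ : Int) : List Int :=
  match ans with
  | [] => []
  | h :: _ => if 0 < h - div then (h - div) :: ans else ans ++ [ans.getLastD 0 + div]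

def solve (A : Int) (B : Int) (C : Int) : List Int :=
  let d := C - B
  let divList := PySem.List.sorted (pvDivLoopA A d d.toNat 1 []) (fun x => x) true
  let div := (pvPickA A C divList).getD 0   -- div is read only inside the loop below
  (PySem.List.pyRange 0 (A - 1) 1).foldl (pvStepA div) [C]

-- ===== PORT B =====
-- while i*i <= d: for e in (i, d//i): add e to the set if d//e < A
def pvCollectB (A : Int) (d : Int) (i : Int) (s : PySem.Set Int) : PySem.Set Int :=
  if PySem.Int.mod d i = 0 then
    [i, PySem.Int.floordiv d i].foldl
      (fun s e => if PySem.Int.floordiv d e < A then PySem.Set.add s e else s) s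
  else s

-- same fuel convention as pvDivLoopA
def pvDivSetB (A : Int) (d : Int) : Nat → Int → PySem.Set Int → PySem.Set Int
  | 0, _, s => s
  | fuel + 1, i, s =>
    if i * i ≤ d then pvDivSetB A d fuel (i + 1) (pvCollectB A d i s) else s

def solve_alt (A : Int) (B : Int) (C : Int) : List Int :=
  if A ≤ 1 then [C]
  else
    let d := C - B
    let divs := pvDivSetB A d d.toNat 1 PySem.Set.empty
    let cands := divs.filter (fun e => decide (A ≤ PySem.Int.floordiv C e))
    let div := (match cands with
      | [] => PySem.List.min? divs (fun x => x)
      | _ :: _ => PySem.List.max? cands (fun x => x)).getD 0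
    let p := min (A - 1) (max 0 (PySem.Int.floordiv (C - 1) div))
    (PySem.List.pyRange p 0 (-1)).map (fun j => C - j * div) ++ [C] ++
      (PySem.List.pyRange 1 (A - p) 1).map (fun k => C + k * div)

-- ===== PRECONDITION & SPEC =====
-- A raises NameError (div never assigned) exactly when A ≥ 2 and C - B ≤ 0; nothing else is excluded.
def Pre_solve (A : Int) (B : Int) (C : Int) : Prop := A ≤ 1 ∨ 1 ≤ C - B
instance (A : Int) (B : Int) (C : Int) : Decidable (Pre_solve A B C) := by unfold Pre_solve; infer_instance
def pvWitness_solve : Int × Int × Int := (4, 3, 15)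

def Spec_solve (A : Int) (B : Int) (C : Int) (out : List Int) : Prop := out = solve_alt A B C
instance (A : Int) (B : Int) (C : Int) (out : List Int) : Decidable (Spec_solve A B C out) := by unfold Spec_solve; infer_instance

-- ===== CLAIM (what is proved, stated in full; the proofs are below) =====
def Claim_equal_solve : Prop := ∀ (A : Int) (B : Int) (C : Int), Dom_solve A B C → Pre_solve A B C → Spec_solve A B C (solve A B C)

-- ===== LEMMAS AND PROOFS =====

-- cofactor inversion: if i divides d and 1 ≤ i*i ≤ d then d // (d // i) = i
lemma pv_cofactor (d i : Int) (h1 : 1 ≤ i) (h2 : i * i ≤ d) (hm : PySem.Int.mod d i = 0) :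
    PySem.Int.floordiv d (PySem.Int.floordiv d i) = i := by
  have hi : 0 < i := by omega
  have hdvd : i ∣ d := (PySem.Int.mod_eq_zero_iff_dvd d i).mp hm
  obtain ⟨k, hk⟩ := hdvd
  have hd1 : 1 ≤ d := by nlinarith
  have hk1 : 1 ≤ k := by nlinarith
  rw [PySem.Int.floordiv_eq_ediv_of_pos hi, hk, Int.mul_ediv_cancel_left _ (by omega : i ≠ 0),
    PySem.Int.floordiv_eq_ediv_of_pos (by omega : (0:Int) < k), mul_comm,
    Int.mul_ediv_cancel_left _ (by omega : k ≠ 0)]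

lemma pv_cofactor_pos (d i : Int) (h1 : 1 ≤ i) (h2 : i * i ≤ d) :
    i ≤ PySem.Int.floordiv d i := by
  exact (PySem.Int.le_floordiv_iff_mul_le (by omega : (0:Int) < i)).mpr h2

-- the two divisor loops collect the same elements
lemma pv_mem_loop_set (A d : Int) : ∀ (fuel : Nat) (i : Int) (acc : List Int) (s : PySem.Set Int),
    1 ≤ i → (∀ x, x ∈ acc ↔ x ∈ s) →
    ∀ x, x ∈ pvDivLoopA A d fuel i acc ↔ x ∈ pvDivSetB A d fuel i s := by
  intro fuel
  induction fuel with
  | zero => intro i acc s _ hmem x; simpa [pvDivLoopA, pvDivSetB] using hmem x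
  | succ fuel ih =>
    intro i acc s hi hmem x
    simp only [pvDivLoopA, pvDivSetB]
    by_cases hc : i * i ≤ d
    · rw [if_pos hc, if_pos hc]
      refine ih (i + 1) _ _ (by omega) ?_ x
      intro y
      by_cases hm : PySem.Int.mod d i = 0
      · have hkey : PySem.Int.floordiv d (PySem.Int.floordiv d i) = i := pv_cofactor d i hi hc hm
        have ha : y ∈ pvCollectA A d i acc ↔
            y ∈ acc ∨ (i < A ∧ y = PySem.Int.floordiv d i) ∨
              (PySem.Int.floordiv d i < A ∧ i ≠ PySem.Int.floordiv d i ∧ y = i) := by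
          simp only [pvCollectA, if_pos hm]
          split_ifs <;> simp [List.mem_append] <;> tauto
        have hb : y ∈ pvCollectB A d i s ↔
            y ∈ s ∨ (PySem.Int.floordiv d i < A ∧ y = i) ∨ (i < A ∧ y = PySem.Int.floordiv d i) := by
          simp only [pvCollectB, if_pos hm, List.foldl_cons, List.foldl_nil, hkey]
          split_ifs <;> simp [PySem.Set.mem_add] <;> tauto
        rw [ha, hb, hmem y]
        by_cases hiq : i = PySem.Int.floordiv d i
        · rw [← hiq]; tauto
        · tauto
      · simp only [pvCollectA, pvCollectB, if_neg hm]; exact hmem y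
    · rw [if_neg hc, if_neg hc]; exact hmem x

-- everything B's loop collects is ≥ 1
lemma pv_divset_pos (A d : Int) : ∀ (fuel : Nat) (i : Int) (s : PySem.Set Int),
    1 ≤ i → (∀ x ∈ s, 1 ≤ x) →
    ∀ x ∈ pvDivSetB A d fuel i s, 1 ≤ x := by
  intro fuel
  induction fuel with
  | zero => intro i s _ hpos x hx; exact hpos x hx
  | succ fuel ih =>
    intro i s hi hpos x hx
    simp only [pvDivSetB] at hx
    by_cases hc : i * i ≤ d
    · rw [if_pos hc] at hx
      refine ih (i + 1) _ (by omega) ?_ x hx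
      intro y hy
      have hq : i ≤ PySem.Int.floordiv d i := pv_cofactor_pos d i hi hc
      by_cases hm : PySem.Int.mod d i = 0
      · simp only [pvCollectB, if_pos hm, List.foldl_cons, List.foldl_nil] at hy
        have step : ∀ (t : PySem.Set Int) (e : Int), (∀ z ∈ t, 1 ≤ z) → 1 ≤ e →
            ∀ z ∈ (if PySem.Int.floordiv d e < A then PySem.Set.add t e else t), 1 ≤ z := by
          intro t e ht he z hz
          split_ifs at hz with h
          · rcases (PySem.Set.mem_add t e z).mp hz with h' | h'
            · exact ht z h'
            · omega
          · exact ht z hz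
        exact step _ _ (step s i hpos hi) (by omega) y hy
      · simp only [pvCollectB, if_neg hm] at hy; exact hpos y hy
    · rw [if_neg hc] at hx; exact hpos x hx

lemma pv_divset_mono (A d : Int) : ∀ (fuel : Nat) (i : Int) (s : PySem.Set Int),
    ∀ x ∈ s, x ∈ pvDivSetB A d fuel i s := by
  intro fuel
  induction fuel with
  | zero => intro i s x hx; exact hx
  | succ fuel ih =>
    intro i s x hx
    simp only [pvDivSetB]
    by_cases hc : i * i ≤ d
    · rw [if_pos hc]
      refine ih (i + 1) _ x ?_
      by_cases hm : PySem.Int.mod d i = 0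
      · simp only [pvCollectB, if_pos hm, List.foldl_cons, List.foldl_nil]
        have step : ∀ (t : PySem.Set Int) (e : Int), x ∈ t →
            x ∈ (if PySem.Int.floordiv d e < A then PySem.Set.add t e else t) := by
          intro t e ht
          split_ifs
          · exact (PySem.Set.mem_add t e x).mpr (Or.inl ht)
          · exact ht
        exact step _ _ (step s i hx)
      · simpa [pvCollectB, if_neg hm] using hx
    · rw [if_neg hc]; exact hx

-- with A ≥ 2 and d ≥ 1, d itself is collected
lemma pv_d_mem_divset (A d : Int) (hA : 2 ≤ A) (hd : 1 ≤ d) :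
    d ∈ pvDivSetB A d d.toNat 1 PySem.Set.empty := by
  obtain ⟨fuel, hf⟩ : ∃ f, d.toNat = f + 1 := ⟨d.toNat - 1, by omega⟩
  rw [hf]
  simp only [pvDivSetB]
  rw [if_pos (by nlinarith : (1:Int) * 1 ≤ d)]
  refine pv_divset_mono A d fuel 2 _ d ?_
  have hm1 : PySem.Int.mod d 1 = 0 := by
    rw [PySem.Int.mod_eq_emod_of_pos (by omega : (0:Int) < 1)]; simp
  have hf1 : PySem.Int.floordiv d 1 = d := by
    rw [PySem.Int.floordiv_eq_ediv_of_pos (by omega : (0:Int) < 1)]; simp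
  have hfd : PySem.Int.floordiv d d = 1 := by
    rw [PySem.Int.floordiv_eq_ediv_of_pos (by omega : (0:Int) < d)]
    exact Int.ediv_self (by omega)
  simp only [pvCollectB, if_pos hm1, List.foldl_cons, List.foldl_nil, hf1, hfd, if_pos (by omega : (1:Int) < A)]
  exact (PySem.Set.mem_add _ d d).mpr (Or.inr rfl)

-- A's for/break scan on a descending list: the result and its extremal properties
lemma pv_pick_spec (A C : Int) : ∀ (L : List Int), L.Pairwise (fun a b => b ≤ a) → L ≠ [] →
    ∃ m, pvPickA A C L = some m ∧ m ∈ L ∧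
      (∀ y ∈ L, A ≤ PySem.Int.floordiv C y → y ≤ m) ∧
      (A ≤ PySem.Int.floordiv C m ∨ ((∀ y ∈ L, ¬ A ≤ PySem.Int.floordiv C y) ∧ ∀ y ∈ L, m ≤ y)) := by
  intro L
  induction L with
  | nil => intro _ h; exact absurd rfl h
  | cons e t iht =>
    intro hp _
    by_cases hPe : A ≤ PySem.Int.floordiv C e
    · refine ⟨e, by rw [pvPickA.eq_def]; simp [hPe], List.mem_cons_self, ?_, Or.inl hPe⟩
      intro y hy _
      rcases List.mem_cons.mp hy with h | h
      · omega
      · exact (List.pairwise_cons.mp hp).1 y h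
    · cases t with
      | nil =>
        refine ⟨e, by rw [pvPickA.eq_def]; simp [hPe], List.mem_cons_self, ?_, Or.inr ⟨?_, ?_⟩⟩ <;>
          · intro y hy
            rcases List.mem_cons.mp hy with h | h
            · subst h; first | (intro _; omega) | exact hPe | omega
            · simp at h
      | cons f u =>
        obtain ⟨m, hm1, hm2, hm3, hm4⟩ := iht (List.pairwise_cons.mp hp).2 (by simp)
        have hme : m ≤ e := (List.pairwise_cons.mp hp).1 m hm2
        refine ⟨m, by rw [pvPickA.eq_def]; simp [hPe, hm1], List.mem_cons_of_mem _ hm2, ?_, ?_⟩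
        · intro y hy hPy
          rcases List.mem_cons.mp hy with h | h
          · exact absurd (h ▸ hPy) hPe
          · exact hm3 y h hPy
        · rcases hm4 with h | ⟨hnone, hmin⟩
          · exact Or.inl h
          · refine Or.inr ⟨?_, ?_⟩ <;> intro y hy <;> rcases List.mem_cons.mp hy with h | h
            · exact h ▸ hPe
            · exact hnone y h
            · exact h ▸ hme
            · exact hmin y h

-- both versions choose the same step value
lemma pv_same_div (A B C : Int) (hA : 2 ≤ A) (hd : 1 ≤ C - B) :
    ∃ v, pvPickA A C (PySem.List.sorted (pvDivLoopA A (C - B) (C - B).toNat 1 []) (fun x => x) true) = some v ∧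
      (match (pvDivSetB A (C - B) (C - B).toNat 1 PySem.Set.empty).filter
          (fun e => decide (A ≤ PySem.Int.floordiv C e)) with
        | [] => PySem.List.min? (pvDivSetB A (C - B) (C - B).toNat 1 PySem.Set.empty) (fun x => x)
        | _ :: _ => PySem.List.max? ((pvDivSetB A (C - B) (C - B).toNat 1 PySem.Set.empty).filter
            (fun e => decide (A ≤ PySem.Int.floordiv C e))) (fun x => x)) = some v ∧
      1 ≤ v := by
  set d := C - B with hdd
  set S := pvDivSetB A d d.toNat 1 PySem.Set.empty with hS
  set L := pvDivLoopA A d d.toNat 1 [] with hL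
  have hmem : ∀ x, x ∈ L ↔ x ∈ S := by
    refine pv_mem_loop_set A d d.toNat 1 [] PySem.Set.empty (by omega) ?_
    intro x; simp [PySem.Set.empty]
  have hdS : d ∈ S := pv_d_mem_divset A d hA hd
  have hpos : ∀ x ∈ S, 1 ≤ x := by
    refine pv_divset_pos A d d.toNat 1 PySem.Set.empty (by omega) ?_
    intro x hx; simp [PySem.Set.empty] at hx
  have hsmem : ∀ x, x ∈ PySem.List.sorted L (fun x => x) true ↔ x ∈ S := by
    intro x; rw [PySem.List.mem_sorted]; exact hmem x
  have hpw : (PySem.List.sorted L (fun x => x) true).Pairwise (fun a b => b ≤ a) := by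
    simpa using PySem.List.sorted_pairwise_rev L (fun x => x)
  have hne : PySem.List.sorted L (fun x => x) true ≠ [] := by
    intro h
    have := (hsmem d).mpr hdS
    rw [h] at this; simp at this
  obtain ⟨m, hm1, hm2, hm3, hm4⟩ := pv_pick_spec A C _ hpw hne
  have hmS : m ∈ S := (hsmem m).mp hm2
  refine ⟨m, hm1, ?_, hpos m hmS⟩
  cases hcands : S.filter (fun e => decide (A ≤ PySem.Int.floordiv C e)) with
  | nil =>
    have hnoP : ∀ y ∈ S, ¬ A ≤ PySem.Int.floordiv C y := by
      intro y hy hP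
      have : y ∈ S.filter (fun e => decide (A ≤ PySem.Int.floordiv C e)) :=
        List.mem_filter.mpr ⟨hy, by simpa using hP⟩
      rw [hcands] at this; simp at this
    rcases hm4 with hP | ⟨_, hmin⟩
    · exact absurd hP (hnoP m hmS)
    · cases hmin? : PySem.List.min? S (fun x => x) with
      | none => exact absurd ((PySem.List.min?_eq_none_iff S _).mp hmin?) (by intro h; rw [h] at hdS; simp at hdS)
      | some m2 =>
        have h1 : m ≤ m2 := hmin m2 ((hsmem m2).mpr (PySem.List.min?_mem hmin?))
        have h2 : m2 ≤ m := PySem.List.min?_isMin hmin? m hmS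
        simp [le_antisymm h1 h2]
  | cons c cs =>
    have hcS : c ∈ S ∧ A ≤ PySem.Int.floordiv C c := by
      have : c ∈ S.filter (fun e => decide (A ≤ PySem.Int.floordiv C e)) := by rw [hcands]; simp
      have h := List.mem_filter.mp this
      exact ⟨h.1, by simpa using h.2⟩
    have hPm : A ≤ PySem.Int.floordiv C m := by
      rcases hm4 with hP | ⟨hnone, _⟩
      · exact hP
      · exact absurd hcS.2 (hnone c ((hsmem c).mpr hcS.1))
    have hmc : m ∈ S.filter (fun e => decide (A ≤ PySem.Int.floordiv C e)) :=
      List.mem_filter.mpr ⟨hmS, by simpa using hPm⟩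
    cases hmax? : PySem.List.max? (c :: cs) (fun x => x) with
    | none => exact absurd ((PySem.List.max?_eq_none_iff _ _).mp hmax?) (by simp)
    | some m2 =>
      have hm2c : m2 ∈ S.filter (fun e => decide (A ≤ PySem.Int.floordiv C e)) := by
        rw [hcands]; exact PySem.List.max?_mem hmax?
      have hm2S := List.mem_filter.mp hm2c
      have h1 : m2 ≤ m := hm3 m2 ((hsmem m2).mpr hm2S.1) (by simpa using hm2S.2)
      have h2 : m ≤ m2 := PySem.List.max?_isMax hmax? m (hcands ▸ hmc)
      simp [le_antisymm h2 h1]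

-- A's build loop computes B's closed form
lemma pv_lastD (C div p t : Int) (ht : 0 ≤ t) :
    ((PySem.List.pyRange p 0 (-1)).map (fun j => C - j * div) ++ [C] ++
      (PySem.List.pyRange 1 (t + 1) 1).map (fun k => C + k * div)).getLastD 0 = C + t * div := by
  by_cases h1 : 1 ≤ t
  · rw [PySem.List.pyRange_one_succ_right (by omega : (1:Int) ≤ t), List.map_append]
    simp only [List.map_cons, List.map_nil]
    rw [← List.append_assoc]
    exact List.getLastD_concat
  · have ht0 : t = 0 := by omega
    subst ht0
    rw [show (0:Int) + 1 = 1 from by ring, PySem.List.pyRange_one_eq_nil (le_refl 1)]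
    simp only [List.map_nil, List.append_nil]
    rw [List.getLastD_concat]
    ring

lemma pv_build (C div : Int) (hdiv : 1 ≤ div) (n : Nat) :
    (PySem.List.pyRange 0 (n : Int) 1).foldl (pvStepA div) [C] =
      (PySem.List.pyRange (min (n : Int) (max 0 (PySem.Int.floordiv (C - 1) div))) 0 (-1)).map
          (fun j => C - j * div) ++ [C] ++
        (PySem.List.pyRange 1 ((n : Int) - min (n : Int) (max 0 (PySem.Int.floordiv (C - 1) div)) + 1) 1).map
          (fun k => C + k * div) := by
  set m := max 0 (PySem.Int.floordiv (C - 1) div) with hmdef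
  have hm0 : 0 ≤ m := le_max_left 0 _
  induction n with
  | zero =>
    rw [show ((0 : Nat) : Int) = 0 by rfl, PySem.List.pyRange_one_eq_nil (le_refl 0),
      show min (0:Int) m = 0 by omega, PySem.List.pyRange_neg_one_eq_nil (le_refl 0)]
    simp [PySem.List.pyRange_one_eq_nil (by omega : (1:Int) ≤ 1)]
  | succ n ihn =>
    have hcast : ((n + 1 : Nat) : Int) = (n : Int) + 1 := by push_cast; ring
    have hn0 : (0:Int) ≤ (n:Int) := by positivity
    rw [hcast, PySem.List.pyRange_one_succ_right hn0, List.foldl_append, ihn]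
    set p := min (n:Int) m with hpdef
    have hp0 : 0 ≤ p := by omega
    have hpn : p ≤ (n:Int) := min_le_left _ _
    have hpm : p ≤ m := min_le_right _ _
    set t := (n:Int) - p with htdef
    have ht0 : 0 ≤ t := by omega
    have hshape : ∃ R, (PySem.List.pyRange p 0 (-1)).map (fun j => C - j * div) ++ [C] ++
        (PySem.List.pyRange 1 (t + 1) 1).map (fun k => C + k * div) = (C - p * div) :: R := by
      by_cases hp : 0 < p
      · rw [PySem.List.pyRange_neg_one_cons hp]
        exact ⟨_, rfl⟩
      · have hp' : p = 0 := by omega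
        refine ⟨(PySem.List.pyRange 1 (t + 1) 1).map (fun k => C + k * div), ?_⟩
        rw [hp', PySem.List.pyRange_neg_one_eq_nil (le_refl 0)]
        simp
    obtain ⟨R, hR⟩ := hshape
    have hcond : (0 < C - p * div - div) ↔ p + 1 ≤ m := by
      have h1 : p + 1 ≤ PySem.Int.floordiv (C - 1) div ↔ (p + 1) * div ≤ C - 1 :=
        PySem.Int.le_floordiv_iff_mul_le (by omega : (0:Int) < div)
      constructor
      · intro h
        have : (p + 1) * div ≤ C - 1 := by nlinarith
        omega
      · intro h
        have h2 : p + 1 ≤ PySem.Int.floordiv (C - 1) div := by omega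
        have := h1.mp h2
        nlinarith
    simp only [List.foldl_cons, List.foldl_nil, hR, pvStepA]
    by_cases hc : 0 < C - p * div - div
    · rw [if_pos hc, ← hR]
      have hp1m : p + 1 ≤ m := hcond.mp hc
      have hpn' : p = (n:Int) := by omega
      have hmin : min ((n:Int) + 1) m = p + 1 := by omega
      rw [hmin, show (n:Int) + 1 - (p + 1) + 1 = t + 1 by omega,
        PySem.List.pyRange_neg_one_cons (by omega : (0:Int) < p + 1), List.map_cons,
        show p + 1 - 1 = p by ring]
      simp only [List.cons_append]
      congr 1
      ring
    · rw [if_neg hc, ← hR]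
      have hp1m : ¬ p + 1 ≤ m := fun h => hc (hcond.mpr h)
      have hpm' : p = m := by omega
      have hmin : min ((n:Int) + 1) m = p := by omega
      rw [hmin, show (n:Int) + 1 - p + 1 = (t + 1) + 1 by omega,
        PySem.List.pyRange_one_succ_right (by omega : (1:Int) ≤ t + 1), List.map_append,
        pv_lastD C div p t ht0]
      simp only [List.map_cons, List.map_nil]
      rw [show C + t * div + div = C + (t + 1) * div from by ring, ← List.append_assoc]


-- ===== VERDICT (by name: the statement is the Claim_ definition above) =====
theorem solve_spec : Claim_equal_solve := by
  intro A B C _ hpre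
  unfold Spec_solve
  by_cases hA : A ≤ 1
  · simp [solve, solve_alt, hA, PySem.List.pyRange_one_eq_nil (by omega : A - 1 ≤ 0)]
  · have hA2 : 2 ≤ A := by omega
    have hd : 1 ≤ C - B := hpre.resolve_left hA
    obtain ⟨v, hpick, hmatch, hv⟩ := pv_same_div A B C hA2 hd
    have hn : ((A - 1).toNat : Int) = A - 1 := by omega
    simp only [solve, solve_alt, if_neg hA, hpick, hmatch, Option.getD_some]
    rw [← hn, pv_build C v hv (A - 1).toNat]
    have : (((A - 1).toNat : Int)) - min (((A - 1).toNat : Int)) (max 0 (PySem.Int.floordiv (C - 1) v)) + 1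
        = A - min (A - 1) (max 0 (PySem.Int.floordiv (C - 1) v)) := by omega
    rw [this, hn]
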